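-- pv_equiv track=rewrite | github.com/jochensambaer1/22-23-Python-OOP | labo4/oefening13.py | anagram_zinnen
-- ===== SOURCE A (Python) =====
-- import string
--
-- def anagram_zinnen(zin1, zin2):
--     # Normaliseer de zinnen door hoofdletters, leestekens en spaties te negeren
--     zin1_norm = zin1.lower().translate(str.maketrans('', '', string.punctuation + ' '))
--     zin2_norm = zin2.lower().translate(str.maketrans('', '', string.punctuation + ' '))
--
--     # Maak dictionaries van de frequenties van de karakters in de genormaliseerde zinnen
--     freq1 = {}
--     freq2 = {}
--     for c in zin1_norm:
--         freq1[c] = freq1.get(c, 0) + 1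
--     for c in zin2_norm:
--         freq2[c] = freq2.get(c, 0) + 1
--
--     # Controleer of de dictionaries gelijk zijn
--     return freq1 == freq2
-- ===== SOURCE B (Python) =====
-- import string
--
-- def anagram_zinnen(zin1, zin2):
--     # Same normalization as A; then compare sorted character lists instead of frequency dicts.
--     tabel = str.maketrans('', '', string.punctuation + ' ')
--     return sorted(zin1.lower().translate(tabel)) == sorted(zin2.lower().translate(tabel))
-- ===== Notes on version B (the rewrite author's own statement) =====
-- stated objective: simpler
-- what changed: Replaces the two frequency-dictionary loops and dict comparison with sorting the two normalized character lists and comparing them directly.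
import Mathlib
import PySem

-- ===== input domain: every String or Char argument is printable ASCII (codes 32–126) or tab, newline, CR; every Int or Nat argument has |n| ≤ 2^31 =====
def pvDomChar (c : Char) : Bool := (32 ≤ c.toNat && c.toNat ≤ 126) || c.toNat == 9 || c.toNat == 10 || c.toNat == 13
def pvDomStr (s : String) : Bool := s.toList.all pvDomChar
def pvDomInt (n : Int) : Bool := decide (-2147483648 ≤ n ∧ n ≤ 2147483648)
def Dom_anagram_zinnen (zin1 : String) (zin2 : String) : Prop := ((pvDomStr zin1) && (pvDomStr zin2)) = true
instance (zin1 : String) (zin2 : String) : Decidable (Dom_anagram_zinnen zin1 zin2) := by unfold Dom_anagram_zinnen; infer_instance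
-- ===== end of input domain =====

-- B replaces A's two frequency-dictionary loops and dict comparison by sorting the two
-- normalized character lists and comparing them (objective: simpler).

-- string.punctuation + ' ' (the characters str.maketrans('', '', …) removes)
def pvRemoved : List Char := "!\"#$%&'()*+,-./:;<=>?@[\\]^_`{|}~ ".toList

-- zin.lower().translate(str.maketrans('', '', string.punctuation + ' ')) — identical in A and B
def pvNorm (zin : String) : List Char :=
  (PySem.Str.lower zin).toList.filter (fun c => !pvRemoved.contains c)

-- ===== PORT A =====
-- Python's dict == (order-insensitive): same key set and equal values under get?
def pvDictEq (d1 d2 : PySem.Dict Char Int) : Bool :=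
  PySem.Set.equal d1.keys d2.keys && d1.keys.all (fun k => d1.get? k == d2.get? k)

def anagram_zinnen (zin1 : String) (zin2 : String) : Bool :=
  let zin1_norm := pvNorm zin1
  let zin2_norm := pvNorm zin2
  -- freq[c] = freq.get(c, 0) + 1 loops
  let freq1 := zin1_norm.foldl (fun d c => d.insert c (d.getD c 0 + 1)) PySem.Dict.empty
  let freq2 := zin2_norm.foldl (fun d c => d.insert c (d.getD c 0 + 1)) PySem.Dict.empty
  pvDictEq freq1 freq2

-- ===== PORT B =====
def anagram_zinnen_alt (zin1 : String) (zin2 : String) : Bool :=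
  PySem.List.sorted (pvNorm zin1) (fun x => x) false ==
    PySem.List.sorted (pvNorm zin2) (fun x => x) false

-- ===== PRECONDITION & SPEC =====
def Spec_anagram_zinnen (zin1 : String) (zin2 : String) (out : Bool) : Prop := out = anagram_zinnen_alt zin1 zin2
instance (zin1 : String) (zin2 : String) (out : Bool) : Decidable (Spec_anagram_zinnen zin1 zin2 out) := by unfold Spec_anagram_zinnen; infer_instance

-- ===== CLAIM (what is proved, stated in full; the proofs are below) =====
def Claim_equal_anagram_zinnen : Prop := ∀ (zin1 : String) (zin2 : String), Dom_anagram_zinnen zin1 zin2 → Spec_anagram_zinnen zin1 zin2 (anagram_zinnen zin1 zin2)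

-- ===== LEMMAS AND PROOFS =====

theorem get?_counter_of_mem {xs : List Char} {k : Char} (h : k ∈ xs) :
    (PySem.Dict.counter xs).get? k = some (xs.count k : Int) := by
  have hm : (k, (xs.count k : Int)) ∈ (PySem.Dict.counter xs).items := by
    rw [PySem.Dict.items_counter]
    exact List.mem_map.mpr ⟨k, (PySem.Set.mem_ofList _ _).mpr h, rfl⟩
  exact PySem.Dict.get?_of_mem_items _ hm (PySem.Dict.nodup_keys_counter xs)

theorem dictEq_counter_iff (xs ys : List Char) :
    pvDictEq (PySem.Dict.counter xs) (PySem.Dict.counter ys) = true ↔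
      ∀ c, xs.count c = ys.count c := by
  unfold pvDictEq
  rw [Bool.and_eq_true, PySem.Set.equal_iff, List.all_eq_true]
  simp only [PySem.Dict.keys_counter, PySem.Set.mem_ofList]
  constructor
  · rintro ⟨hkeys, hvals⟩ c
    by_cases hc : c ∈ xs
    · have := hvals c hc
      rw [get?_counter_of_mem hc, get?_counter_of_mem ((hkeys c).mp hc)] at this
      have := beq_iff_eq.mp this
      exact_mod_cast Option.some.inj this
    · have hc2 : c ∉ ys := fun h => hc ((hkeys c).mpr h)
      simp [List.count_eq_zero.mpr hc, List.count_eq_zero.mpr hc2]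
  · intro hcount
    constructor
    · intro c
      rw [← List.count_pos_iff, ← List.count_pos_iff, hcount c]
    · intro k hk
      have hk2 : k ∈ ys := by
        rw [← List.count_pos_iff, ← hcount k, List.count_pos_iff]; exact hk
      rw [get?_counter_of_mem hk, get?_counter_of_mem hk2, hcount k]
      exact beq_self_eq_true _

theorem ports_agree (zin1 zin2 : String) :
    anagram_zinnen zin1 zin2 = anagram_zinnen_alt zin1 zin2 := by
  show pvDictEq ((pvNorm zin1).foldl (fun d c => d.insert c (d.getD c 0 + 1)) PySem.Dict.empty)
        ((pvNorm zin2).foldl (fun d c => d.insert c (d.getD c 0 + 1)) PySem.Dict.empty) = _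
  rw [PySem.Dict.foldl_insert_getD_add_one_eq_counter,
      PySem.Dict.foldl_insert_getD_add_one_eq_counter]
  unfold anagram_zinnen_alt
  rw [Bool.eq_iff_iff, dictEq_counter_iff, beq_iff_eq,
      PySem.List.sorted_id_eq_sorted_id_iff_perm]
  exact (List.perm_iff_count).symm

-- ===== VERDICT (by name: the statement is the Claim_ definition above) =====
theorem anagram_zinnen_spec : Claim_equal_anagram_zinnen :=
  fun zin1 zin2 _ => ports_agree zin1 zin2
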